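-- pv_equiv track=rewrite | github.com/sonnyitsunny/Algorithm | 프로그래머스/2/172927. 광물 캐기/광물 캐기.py | solution
-- ===== SOURCE A (Python) =====
-- def solution(picks, minerals):
--     answer = 0
--
--     group=[]
--
--     #미네랄은 순서 고정인데 지금 최소 피로도 순으로 구하려고 순서바꾸게됨 근데 그러면 원래라면 못캘 뒤에 있는놈이 앞쪽으로
-- #  올수도 있다.
--     cnt=sum(picks)
--     if cnt*5<len(minerals):
--         minerals=minerals[:cnt*5]
--
--     for i in range(0,len(minerals),5):
--         group.append(minerals[i:i+5])
--
--     score=[]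
--
--     #어차피 무조건 캐야되는 애들임, 힘든애를 좋은애로 캔다.
--     for g in group:
--         dia_cnt=g.count("diamond")
--         iron_cnt=g.count("iron")
--         stone_cnt=g.count("stone")
--         score.append((dia_cnt,iron_cnt,stone_cnt))
--     score.sort(key=lambda x:(-x[0],-x[1],-x[2]))
--
--
--
--
--     for dia,iron,stone in score:
--
--         if picks[0]>0:
--             picks[0]-=1
--             answer+=dia*1+iron*1+stone*1
--         elif picks[1]>0:
--             picks[1]-=1
--             answer+=dia*5+iron*1+stone*1
--         elif picks[2]>0:
--             picks[2]-=1
--             answer+=dia*25+iron*5+stone*1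
--
--
--
--     return answer
-- ===== SOURCE B (Python) =====
-- def solution(picks, minerals):
--     # Note: like A, this mutates picks in place (decrements the used picks).
--     cnt = sum(picks)
--     if cnt * 5 < len(minerals):
--         minerals = minerals[:cnt * 5]
--     # bucket-count the group score triples; the key space (d, r, s) with d+r+s <= 5 is finite,
--     # so a counting pass over the 56 possible keys in descending order replaces the comparison sort
--     freq = {}
--     ngroups = 0
--     for i in range(0, len(minerals), 5):
--         g = minerals[i:i + 5]
--         k = (g.count("diamond"), g.count("iron"), g.count("stone"))
--         freq[k] = freq.get(k, 0) + 1
--         ngroups += 1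
--     q = [max(p, 0) for p in picks[:3]] + [0, 0, 0]
--     b0 = q[0]
--     b1 = b0 + q[1]
--     b2 = b1 + q[2]
--     total = 0
--     pos = 0
--     for d in range(5, -1, -1):
--         for r in range(5 - d, -1, -1):
--             for s in range(5 - d - r, -1, -1):
--                 c = freq.get((d, r, s), 0)
--                 hi = pos + c
--                 n0 = max(0, min(hi, b0) - pos)
--                 n1 = max(0, min(hi, b1) - max(pos, b0))
--                 n2 = max(0, min(hi, b2) - max(pos, b1))
--                 total += n0 * (d + r + s) + n1 * (5 * d + r + s) + n2 * (25 * d + 5 * r + s)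
--                 pos = hi
--     # the same in-place mutation of picks as A performs
--     u = (min(ngroups, b0), min(max(ngroups - b0, 0), b1 - b0), min(max(ngroups - b1, 0), b2 - b1))
--     for i in range(min(3, len(picks))):
--         picks[i] -= u[i]
--     return total
-- ===== Notes on version B (the rewrite author's own statement) =====
-- stated objective: alternative
-- what changed: A's comparison sort of the group score triples plus a stateful if/elif greedy loop is replaced by a counting pass: the triples are bucket-counted in a dict (the key space d+r+s<=5 is finite), the 56 possible keys are walked in descending order, and each bucket's cost is computed arithmetically from the overlap of its position block with the three pick-tier intervals; B performs the same in-place mutation of picks as A.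
import Mathlib
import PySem

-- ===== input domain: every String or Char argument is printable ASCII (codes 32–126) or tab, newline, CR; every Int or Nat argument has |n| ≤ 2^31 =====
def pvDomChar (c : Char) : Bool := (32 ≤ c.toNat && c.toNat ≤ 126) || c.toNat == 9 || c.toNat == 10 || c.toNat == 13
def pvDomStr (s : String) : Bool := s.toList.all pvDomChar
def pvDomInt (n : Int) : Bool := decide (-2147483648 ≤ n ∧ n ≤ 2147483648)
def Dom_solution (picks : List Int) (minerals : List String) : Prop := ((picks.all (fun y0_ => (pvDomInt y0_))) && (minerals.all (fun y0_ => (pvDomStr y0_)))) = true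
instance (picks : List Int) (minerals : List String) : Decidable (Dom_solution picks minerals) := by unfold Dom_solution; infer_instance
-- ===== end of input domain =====

-- B replaces A's comparison sort + stateful if/elif greedy loop by a counting pass: the group score
-- triples are bucket-counted (the key space d+r+s ≤ 5 is finite), the 56 possible keys are walked in
-- descending order and each bucket's cost comes from its overlap with the three pick-tier intervals
-- (objective: alternative — the comparison sort of the groups disappears, at similar measured cost).
-- Python A mutates picks in place; Python B performs the identical mutation; the equivalence proved
-- here is about the RETURN value (the Lean ports are pure).

-- ===== PORT A =====
-- A reads/writes picks[0], picks[1], picks[2] inside the loop; the port tracks them as a triple read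
-- with default 0; exact on Pre_solution (outside it Python A raises IndexError and nothing is claimed).
def solution (picks : List Int) (minerals : List String) : Int :=
  let answer : Int := 0
  let cnt : Int := picks.sum
  let minerals := if cnt * 5 < (minerals.length : Int)
      then PySem.List.slice minerals none (some (cnt * 5)) else minerals
  let group : List (List String) :=
    (PySem.List.pyRange 0 (minerals.length : Int) 5).foldl
      (fun acc i => acc ++ [PySem.List.slice minerals (some i) (some (i + 5))]) []
  let score : List (Int × Int × Int) :=
    group.foldl (fun acc g =>
      acc ++ [(((g.count "diamond" : Nat) : Int), ((g.count "iron" : Nat) : Int),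
               ((g.count "stone" : Nat) : Int))]) []
  let score := PySem.List.sorted score
      (fun t => toLex ((-t.1, toLex ((-t.2.1, -t.2.2) : Int × Int)) : Int × (Int ×ₗ Int))) false
  let st := score.foldl (fun (st : Int × Int × Int × Int) t =>
      match st, t with
      | (answer, p0, p1, p2), (dia, iron, stone) =>
        if p0 > 0 then (answer + dia * 1 + iron * 1 + stone * 1, p0 - 1, p1, p2)
        else if p1 > 0 then (answer + dia * 5 + iron * 1 + stone * 1, p0, p1 - 1, p2)
        else if p2 > 0 then (answer + dia * 25 + iron * 5 + stone * 1, p0, p1, p2 - 1)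
        else (answer, p0, p1, p2))
    (answer, PySem.List.pyGetD picks 0 0, PySem.List.pyGetD picks 1 0, PySem.List.pyGetD picks 2 0)
  st.1

-- ===== PORT B =====
-- transliteration of Source B; Source B's 'ngroups' and the final loop only feed the in-place mutation of
-- picks, which has no counterpart in the pure port (the port returns 'total', as Source B returns it).
def solution_alt (picks : List Int) (minerals : List String) : Int :=
  let cnt : Int := picks.sum
  let minerals := if cnt * 5 < (minerals.length : Int)
      then PySem.List.slice minerals none (some (cnt * 5)) else minerals
  let freq : PySem.Dict (Int × Int × Int) Int :=
    (PySem.List.pyRange 0 (minerals.length : Int) 5).foldl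
      (fun d i =>
        let g := PySem.List.slice minerals (some i) (some (i + 5))
        let k : Int × Int × Int := (((g.count "diamond" : Nat) : Int), ((g.count "iron" : Nat) : Int),
                                    ((g.count "stone" : Nat) : Int))
        d.insert k (d.getD k 0 + 1)) PySem.Dict.empty
  let q : List Int := (PySem.List.slice picks none (some 3)).map (fun p => max p 0) ++ [0, 0, 0]
  let b0 : Int := PySem.List.pyGetD q 0 0
  let b1 : Int := b0 + PySem.List.pyGetD q 1 0
  let b2 : Int := b1 + PySem.List.pyGetD q 2 0
  let st := (PySem.List.pyRange 5 (-1) (-1)).foldl (fun (st : Int × Int) d =>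
      (PySem.List.pyRange (5 - d) (-1) (-1)).foldl (fun st r =>
        (PySem.List.pyRange (5 - d - r) (-1) (-1)).foldl (fun (st : Int × Int) s =>
          let c := freq.getD (d, r, s) 0
          let hi := st.2 + c
          let n0 := max 0 (min hi b0 - st.2)
          let n1 := max 0 (min hi b1 - max st.2 b0)
          let n2 := max 0 (min hi b2 - max st.2 b1)
          (st.1 + n0 * (d + r + s) + n1 * (5 * d + r + s) + n2 * (25 * d + 5 * r + s), hi)) st) st)
      ((0 : Int), (0 : Int))
  st.1

-- ===== PRECONDITION & SPEC =====
-- Pre_ excludes exactly the inputs where Python A raises IndexError: fewer than three picks and more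
-- mineral groups (after A's capping slice, whose clamped length is written out arithmetically here)
-- than the non-negative picks can mine, so that the greedy reads the missing picks[1]/picks[2].
def Pre_solution (picks : List Int) (minerals : List String) : Prop :=
  3 ≤ picks.length ∨
    (let c := picks.sum
     let L : Int := (minerals.length : Int)
     let m : Int := if c * 5 < L then max 0 (min L (if c * 5 < 0 then L + c * 5 else c * 5)) else L
     (m + 4) / 5 ≤ (picks.map (fun p => max p 0)).sum)
instance (picks : List Int) (minerals : List String) : Decidable (Pre_solution picks minerals) := by
  unfold Pre_solution; infer_instance
def pvWitness_solution : List Int × List String := ([1, 1, 1], ["diamond", "stone", "iron", "x", "x", "stone"])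
def Spec_solution (picks : List Int) (minerals : List String) (out : Int) : Prop := out = solution_alt picks minerals
instance (picks : List Int) (minerals : List String) (out : Int) : Decidable (Spec_solution picks minerals out) := by unfold Spec_solution; infer_instance

-- ===== CLAIM (what is proved, stated in full; the proofs are below) =====
def Claim_equal_solution : Prop := ∀ (picks : List Int) (minerals : List String), Dom_solution picks minerals → Pre_solution picks minerals → Spec_solution picks minerals (solution picks minerals)

-- ===== LEMMAS AND PROOFS =====

-- tier costs of a group score triple: mined with the diamond / iron / stone pick
def pvC0 (x : Int × Int × Int) : Int := x.1 + x.2.1 + x.2.2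
def pvC1 (x : Int × Int × Int) : Int := 5 * x.1 + x.2.1 + x.2.2
def pvC2 (x : Int × Int × Int) : Int := 25 * x.1 + 5 * x.2.1 + x.2.2

-- total fatigue of a sorted score list when the first b0 groups cost pvC0, the next b1-b0 cost pvC1,
-- the next b2-b1 cost pvC2 and the rest are not mined
def pvSumTier : List (Int × Int × Int) → Int → Int → Int → Int
  | [], _, _, _ => 0
  | x :: xs, b0, b1, b2 =>
      (if 0 < b0 then pvC0 x else if 0 < b1 then pvC1 x else if 0 < b2 then pvC2 x else 0)
        + pvSumTier xs (b0 - 1) (b1 - 1) (b2 - 1)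

lemma pvSumTier_congr (l : List (Int × Int × Int)) :
    ∀ (b0 b0' b1 b1' b2 b2' : Int),
      ((b0 ≤ 0 ∧ b0' ≤ 0) ∨ b0 = b0') → ((b1 ≤ 0 ∧ b1' ≤ 0) ∨ b1 = b1') →
      ((b2 ≤ 0 ∧ b2' ≤ 0) ∨ b2 = b2') →
      pvSumTier l b0 b1 b2 = pvSumTier l b0' b1' b2' := by
  induction l with
  | nil => intros; rfl
  | cons x xs ih =>
    intro b0 b0' b1 b1' b2 b2' h0 h1 h2
    simp only [pvSumTier]
    have e0 : (0 < b0) ↔ (0 < b0') := by omega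
    have e1 : (0 < b1) ↔ (0 < b1') := by omega
    have e2 : (0 < b2) ↔ (0 < b2') := by omega
    simp only [e0, e1, e2]
    rw [ih (b0 - 1) (b0' - 1) (b1 - 1) (b1' - 1) (b2 - 1) (b2' - 1)
      (by omega) (by omega) (by omega)]

-- A's greedy elif fold over the sorted list IS pvSumTier with the capped cumulative pick boundaries
lemma pvGreedy_eq (score : List (Int × Int × Int)) :
    ∀ (ans p0 p1 p2 : Int),
    (score.foldl (fun (st : Int × Int × Int × Int) t =>
      match st, t with
      | (answer, q0, q1, q2), (dia, iron, stone) =>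
        if q0 > 0 then (answer + dia * 1 + iron * 1 + stone * 1, q0 - 1, q1, q2)
        else if q1 > 0 then (answer + dia * 5 + iron * 1 + stone * 1, q0, q1 - 1, q2)
        else if q2 > 0 then (answer + dia * 25 + iron * 5 + stone * 1, q0, q1, q2 - 1)
        else (answer, q0, q1, q2)) (ans, p0, p1, p2)).1
    = ans + pvSumTier score (max p0 0) (max p0 0 + max p1 0) (max p0 0 + max p1 0 + max p2 0) := by
  induction score with
  | nil => intro ans p0 p1 p2; simp [pvSumTier]
  | cons x rest ih =>
    intro ans p0 p1 p2
    obtain ⟨d, i, s⟩ := x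
    by_cases h0 : p0 > 0
    · simp only [List.foldl_cons, if_pos h0]
      rw [ih]
      simp only [pvSumTier, pvC0, pvC1, pvC2]
      rw [if_pos (show (0 : Int) < max p0 0 by omega)]
      rw [pvSumTier_congr rest (max (p0 - 1) 0) (max p0 0 - 1)
        (max (p0 - 1) 0 + max p1 0) (max p0 0 + max p1 0 - 1)
        (max (p0 - 1) 0 + max p1 0 + max p2 0) (max p0 0 + max p1 0 + max p2 0 - 1)
        (Or.inr (by omega)) (Or.inr (by omega)) (Or.inr (by omega))]
      ring
    · by_cases h1 : p1 > 0
      · simp only [List.foldl_cons, if_neg h0, if_pos h1]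
        rw [ih]
        simp only [pvSumTier, pvC0, pvC1, pvC2]
        rw [if_neg (show ¬ (0 : Int) < max p0 0 by omega),
          if_pos (show (0 : Int) < max p0 0 + max p1 0 by omega)]
        rw [pvSumTier_congr rest (max p0 0) (max p0 0 - 1)
          (max p0 0 + max (p1 - 1) 0) (max p0 0 + max p1 0 - 1)
          (max p0 0 + max (p1 - 1) 0 + max p2 0) (max p0 0 + max p1 0 + max p2 0 - 1)
          (Or.inl (by omega)) (Or.inr (by omega)) (Or.inr (by omega))]
        ring
      · by_cases h2 : p2 > 0
        · simp only [List.foldl_cons, if_neg h0, if_neg h1, if_pos h2]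
          rw [ih]
          simp only [pvSumTier, pvC0, pvC1, pvC2]
          rw [if_neg (show ¬ (0 : Int) < max p0 0 by omega),
            if_neg (show ¬ (0 : Int) < max p0 0 + max p1 0 by omega),
            if_pos (show (0 : Int) < max p0 0 + max p1 0 + max p2 0 by omega)]
          rw [pvSumTier_congr rest (max p0 0) (max p0 0 - 1)
            (max p0 0 + max p1 0) (max p0 0 + max p1 0 - 1)
            (max p0 0 + max p1 0 + max (p2 - 1) 0) (max p0 0 + max p1 0 + max p2 0 - 1)
            (Or.inl (by omega)) (Or.inl (by omega)) (Or.inr (by omega))]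
          ring
        · simp only [List.foldl_cons, if_neg h0, if_neg h1, if_neg h2]
          rw [ih]
          simp only [pvSumTier]
          rw [if_neg (show ¬ (0 : Int) < max p0 0 by omega),
            if_neg (show ¬ (0 : Int) < max p0 0 + max p1 0 by omega),
            if_neg (show ¬ (0 : Int) < max p0 0 + max p1 0 + max p2 0 by omega)]
          rw [pvSumTier_congr rest (max p0 0) (max p0 0 - 1)
            (max p0 0 + max p1 0) (max p0 0 + max p1 0 - 1)
            (max p0 0 + max p1 0 + max p2 0) (max p0 0 + max p1 0 + max p2 0 - 1)
            (Or.inl (by omega)) (Or.inl (by omega)) (Or.inl (by omega))]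
          ring

lemma pvSumTier_append (u v : List (Int × Int × Int)) :
    ∀ (b0 b1 b2 : Int),
      pvSumTier (u ++ v) b0 b1 b2
        = pvSumTier u b0 b1 b2
          + pvSumTier v (b0 - u.length) (b1 - u.length) (b2 - u.length) := by
  induction u with
  | nil => intro b0 b1 b2; simp [pvSumTier]
  | cons x xs ih =>
    intro b0 b1 b2
    simp only [List.cons_append, pvSumTier, List.length_cons, ih]
    push_cast
    rw [show b0 - 1 - (xs.length : Int) = b0 - ((xs.length : Int) + 1) from by ring,
      show b1 - 1 - (xs.length : Int) = b1 - ((xs.length : Int) + 1) from by ring,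
      show b2 - 1 - (xs.length : Int) = b2 - ((xs.length : Int) + 1) from by ring]
    ring

lemma pvSumTier_replicate (n : Nat) (x : Int × Int × Int) :
    ∀ (b0 b1 b2 : Int), b0 ≤ b1 → b1 ≤ b2 →
      pvSumTier (List.replicate n x) b0 b1 b2
        = max 0 (min (n : Int) b0) * pvC0 x
          + max 0 (min (n : Int) b1 - max 0 b0) * pvC1 x
          + max 0 (min (n : Int) b2 - max 0 b1) * pvC2 x := by
  induction n with
  | zero =>
    intro b0 b1 b2 h01 h12
    rw [show (((0 : Nat) : Int)) = 0 from rfl]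
    rw [show max 0 (min (0 : Int) b0) = 0 from by omega,
      show max 0 (min (0 : Int) b1 - max 0 b0) = 0 from by omega,
      show max 0 (min (0 : Int) b2 - max 0 b1) = 0 from by omega]
    simp [pvSumTier]
  | succ n ih =>
    intro b0 b1 b2 h01 h12
    rw [List.replicate_succ]
    simp only [pvSumTier]
    rw [ih (b0 - 1) (b1 - 1) (b2 - 1) (by omega) (by omega)]
    push_cast
    by_cases h0 : (0 : Int) < b0
    · rw [if_pos h0]
      rw [show max 0 (min ((n : Int)) (b0 - 1)) = max 0 (min ((n : Int) + 1) b0) - 1 from by omega,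
        show max 0 (min ((n : Int)) (b1 - 1) - max 0 (b0 - 1)) = max 0 (min ((n : Int) + 1) b1 - max 0 b0) from by omega,
        show max 0 (min ((n : Int)) (b2 - 1) - max 0 (b1 - 1)) = max 0 (min ((n : Int) + 1) b2 - max 0 b1) from by omega]
      ring
    · by_cases h1 : (0 : Int) < b1
      · rw [if_neg h0, if_pos h1]
        rw [show max 0 (min ((n : Int)) (b0 - 1)) = max 0 (min ((n : Int) + 1) b0) from by omega,
          show max 0 (min ((n : Int)) (b1 - 1) - max 0 (b0 - 1)) = max 0 (min ((n : Int) + 1) b1 - max 0 b0) - 1 from by omega,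
          show max 0 (min ((n : Int)) (b2 - 1) - max 0 (b1 - 1)) = max 0 (min ((n : Int) + 1) b2 - max 0 b1) from by omega]
        ring
      · by_cases h2 : (0 : Int) < b2
        · rw [if_neg h0, if_neg h1, if_pos h2]
          rw [show max 0 (min ((n : Int)) (b0 - 1)) = max 0 (min ((n : Int) + 1) b0) from by omega,
            show max 0 (min ((n : Int)) (b1 - 1) - max 0 (b0 - 1)) = max 0 (min ((n : Int) + 1) b1 - max 0 b0) from by omega,
            show max 0 (min ((n : Int)) (b2 - 1) - max 0 (b1 - 1)) = max 0 (min ((n : Int) + 1) b2 - max 0 b1) - 1 from by omega]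
          ring
        · rw [if_neg h0, if_neg h1, if_neg h2]
          rw [show max 0 (min ((n : Int)) (b0 - 1)) = max 0 (min ((n : Int) + 1) b0) from by omega,
            show max 0 (min ((n : Int)) (b1 - 1) - max 0 (b0 - 1)) = max 0 (min ((n : Int) + 1) b1 - max 0 b0) from by omega,
            show max 0 (min ((n : Int)) (b2 - 1) - max 0 (b1 - 1)) = max 0 (min ((n : Int) + 1) b2 - max 0 b1) from by omega]
          ring

-- the 56 possible score triples, in the descending order B's three nested loops walk them
def pvEnumKeys : List (Int × Int × Int) :=
  (PySem.List.pyRange 5 (-1) (-1)).flatMap (fun d =>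
    (PySem.List.pyRange (5 - d) (-1) (-1)).flatMap (fun r =>
      (PySem.List.pyRange (5 - d - r) (-1) (-1)).map (fun s => (d, r, s))))

def pvKey (t : Int × Int × Int) : Int ×ₗ (Int ×ₗ Int) :=
  toLex ((-t.1, toLex ((-t.2.1, -t.2.2) : Int × Int)) : Int × (Int ×ₗ Int))

lemma pvKey_inj : Function.Injective pvKey := by
  intro a b h
  obtain ⟨a1, a2, a3⟩ := a
  obtain ⟨b1, b2, b3⟩ := b
  have h1 : ((-a1, toLex ((-a2, -a3) : Int × Int)) : Int × (Int ×ₗ Int))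
      = (-b1, toLex ((-b2, -b3) : Int × Int)) := h
  obtain ⟨e1, e2⟩ := Prod.mk.injEq _ _ _ _ |>.mp h1
  have h2 : ((-a2, -a3) : Int × Int) = (-b2, -b3) := e2
  obtain ⟨e3, e4⟩ := Prod.mk.injEq _ _ _ _ |>.mp h2
  simp only [Prod.mk.injEq]
  refine ⟨by omega, by omega, by omega⟩

-- B's counting loop over a key list computes pvSumTier of the blocks it enumerates
lemma pvFoldB (cnt : (Int × Int × Int) → Nat) (b0 b1 b2 : Int) (hb0 : b0 ≤ b1) (hb1 : b1 ≤ b2) :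
    ∀ (ks : List (Int × Int × Int)) (total pos : Int),
    (ks.foldl (fun (st : Int × Int) k =>
        (st.1 + max 0 (min (st.2 + (cnt k : Int)) b0 - st.2) * pvC0 k
            + max 0 (min (st.2 + (cnt k : Int)) b1 - max st.2 b0) * pvC1 k
            + max 0 (min (st.2 + (cnt k : Int)) b2 - max st.2 b1) * pvC2 k,
          st.2 + (cnt k : Int))) (total, pos)).1
      = total + pvSumTier (ks.flatMap (fun k => List.replicate (cnt k) k)) (b0 - pos) (b1 - pos) (b2 - pos) := by
  intro ks
  induction ks with
  | nil => intro total pos; simp [pvSumTier]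
  | cons k t ih =>
    intro total pos
    simp only [List.foldl_cons, List.flatMap_cons]
    rw [ih]
    rw [pvSumTier_append, List.length_replicate]
    rw [pvSumTier_replicate (cnt k) k (b0 - pos) (b1 - pos) (b2 - pos) (by omega) (by omega)]
    rw [show b0 - (pos + (cnt k : Int)) = b0 - pos - (cnt k : Int) from by ring,
      show b1 - (pos + (cnt k : Int)) = b1 - pos - (cnt k : Int) from by ring,
      show b2 - (pos + (cnt k : Int)) = b2 - pos - (cnt k : Int) from by ring]
    rw [show max 0 (min (pos + (cnt k : Int)) b0 - pos) = max 0 (min ((cnt k : Int)) (b0 - pos)) from by omega,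
      show max 0 (min (pos + (cnt k : Int)) b1 - max pos b0) = max 0 (min ((cnt k : Int)) (b1 - pos) - max 0 (b0 - pos)) from by omega,
      show max 0 (min (pos + (cnt k : Int)) b2 - max pos b1) = max 0 (min ((cnt k : Int)) (b2 - pos) - max 0 (b1 - pos)) from by omega]
    ring

lemma pvFoldl_flatMap {α β σ : Type} (l : List α) (g : α → List β) (f : σ → β → σ) (st : σ) :
    l.foldl (fun st a => (g a).foldl f st) st = (l.flatMap g).foldl f st := by
  induction l generalizing st with
  | nil => rfl
  | cons a t ih => simp [List.foldl_append, ih]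

lemma pvCount_flatMap_replicate (cnt : (Int × Int × Int) → Nat) (x : Int × Int × Int) :
    ∀ (ks : List (Int × Int × Int)), ks.Nodup →
      (ks.flatMap (fun k => List.replicate (cnt k) k)).count x
        = if x ∈ ks then cnt x else 0 := by
  intro ks
  induction ks with
  | nil => intro _; simp
  | cons k t ih =>
    intro hnd
    obtain ⟨hk, ht⟩ := List.nodup_cons.mp hnd
    simp only [List.flatMap_cons, List.count_append, List.count_replicate, ih ht, List.mem_cons]
    by_cases hx : x = k
    · subst hx
      simp [if_neg hk]
    · simp [hx, Ne.symm hx]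

lemma pvPairwise_flatMap_replicate {R : (Int × Int × Int) → (Int × Int × Int) → Prop}
    (hrefl : ∀ a, R a a) (cnt : (Int × Int × Int) → Nat) :
    ∀ (ks : List (Int × Int × Int)), ks.Pairwise R →
      (ks.flatMap (fun k => List.replicate (cnt k) k)).Pairwise R := by
  intro ks
  induction ks with
  | nil => intro _; simp
  | cons k t ih =>
    intro hp
    obtain ⟨hhead, htail⟩ := List.pairwise_cons.mp hp
    simp only [List.flatMap_cons]
    rw [List.pairwise_append]
    refine ⟨List.pairwise_replicate.mpr (Or.inr (hrefl k)), ih htail, ?_⟩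
    intro a ha b hb
    rw [List.eq_of_mem_replicate ha]
    obtain ⟨k', hk', hb'⟩ := List.mem_flatMap.mp hb
    rw [List.eq_of_mem_replicate hb']
    exact hhead k' hk' 

lemma pvMem_enumKeys (d r s : Int) (hd : 0 ≤ d) (hr : 0 ≤ r) (hs : 0 ≤ s) (h : d + r + s ≤ 5) :
    (d, r, s) ∈ pvEnumKeys := by
  unfold pvEnumKeys
  rw [List.mem_flatMap]
  refine ⟨d, PySem.List.mem_pyRange_neg_one.mpr (by omega), ?_⟩
  rw [List.mem_flatMap]
  refine ⟨r, PySem.List.mem_pyRange_neg_one.mpr (by omega), ?_⟩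
  rw [List.mem_map]
  exact ⟨s, PySem.List.mem_pyRange_neg_one.mpr (by omega), rfl⟩

lemma pvCount_three_le (g : List String) :
    g.count "diamond" + g.count "iron" + g.count "stone" ≤ g.length := by
  induction g with
  | nil => simp
  | cons a t ih =>
    simp only [List.count_cons, List.length_cons]
    split_ifs <;> simp_all <;> omega

-- B's three nested countdown loops ARE one pass over pvEnumKeys
lemma pvNestStep (freq : PySem.Dict (Int × Int × Int) Int) (b0 b1 b2 : Int) (st : Int × Int) :
    (PySem.List.pyRange 5 (-1) (-1)).foldl (fun st d =>
      (PySem.List.pyRange (5 - d) (-1) (-1)).foldl (fun st r =>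
        (PySem.List.pyRange (5 - d - r) (-1) (-1)).foldl (fun (st : Int × Int) s =>
          (st.1 + max 0 (min (st.2 + freq.getD (d, r, s) 0) b0 - st.2) * (d + r + s)
              + max 0 (min (st.2 + freq.getD (d, r, s) 0) b1 - max st.2 b0) * (5 * d + r + s)
              + max 0 (min (st.2 + freq.getD (d, r, s) 0) b2 - max st.2 b1) * (25 * d + 5 * r + s),
            st.2 + freq.getD (d, r, s) 0)) st) st) st
    = pvEnumKeys.foldl (fun (st : Int × Int) k =>
        (st.1 + max 0 (min (st.2 + freq.getD k 0) b0 - st.2) * pvC0 k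
            + max 0 (min (st.2 + freq.getD k 0) b1 - max st.2 b0) * pvC1 k
            + max 0 (min (st.2 + freq.getD k 0) b2 - max st.2 b1) * pvC2 k,
          st.2 + freq.getD k 0)) st := by
  unfold pvEnumKeys
  rw [← pvFoldl_flatMap]
  congr 1
  funext st d
  rw [← pvFoldl_flatMap]
  congr 1
  funext st r
  rw [List.foldl_map]
  rfl

-- Source B's dict-building loop is Counter of the per-group key list
lemma pvFreq_eq (M : List String) :
    (PySem.List.pyRange 0 (M.length : Int) 5).foldl
      (fun (d : PySem.Dict (Int × Int × Int) Int) i =>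
        d.insert ((((PySem.List.slice M (some i) (some (i + 5))).count "diamond" : Nat) : Int),
                  (((PySem.List.slice M (some i) (some (i + 5))).count "iron" : Nat) : Int),
                  (((PySem.List.slice M (some i) (some (i + 5))).count "stone" : Nat) : Int))
          (d.getD ((((PySem.List.slice M (some i) (some (i + 5))).count "diamond" : Nat) : Int),
                   (((PySem.List.slice M (some i) (some (i + 5))).count "iron" : Nat) : Int),
                   (((PySem.List.slice M (some i) (some (i + 5))).count "stone" : Nat) : Int)) 0 + 1))
      PySem.Dict.empty
    = PySem.Dict.counter ((PySem.List.pyRange 0 (M.length : Int) 5).map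
        (fun i => ((((PySem.List.slice M (some i) (some (i + 5))).count "diamond" : Nat) : Int),
                   (((PySem.List.slice M (some i) (some (i + 5))).count "iron" : Nat) : Int),
                   (((PySem.List.slice M (some i) (some (i + 5))).count "stone" : Nat) : Int)))) := by
  rw [← PySem.Dict.foldl_insert_getD_add_one_eq_counter, List.foldl_map]

-- the counting pass over the bucketed scores is pvSumTier of the canonical descending arrangement
lemma pvBside (sk : List (Int × Int × Int)) (b0 b1 b2 : Int) (h01 : b0 ≤ b1) (h12 : b1 ≤ b2) :
    ((pvEnumKeys.foldl (fun (st : Int × Int) k =>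
        (st.1 + max 0 (min (st.2 + (PySem.Dict.counter sk).getD k 0) b0 - st.2) * pvC0 k
            + max 0 (min (st.2 + (PySem.Dict.counter sk).getD k 0) b1 - max st.2 b0) * pvC1 k
            + max 0 (min (st.2 + (PySem.Dict.counter sk).getD k 0) b2 - max st.2 b1) * pvC2 k,
          st.2 + (PySem.Dict.counter sk).getD k 0)) ((0 : Int), (0 : Int))).1)
    = pvSumTier (pvEnumKeys.flatMap (fun k => List.replicate (sk.count k) k)) b0 b1 b2 := by
  simp only [PySem.Dict.getD_counter]
  rw [pvFoldB (fun k => sk.count k) b0 b1 b2 h01 h12 pvEnumKeys 0 0]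
  norm_num

-- every group score triple lies in the finite key space
lemma pvScore_mem (M : List String) :
    ∀ x ∈ (PySem.List.pyRange 0 (M.length : Int) 5).map
        (fun i => ((((PySem.List.slice M (some i) (some (i + 5))).count "diamond" : Nat) : Int),
                   (((PySem.List.slice M (some i) (some (i + 5))).count "iron" : Nat) : Int),
                   (((PySem.List.slice M (some i) (some (i + 5))).count "stone" : Nat) : Int))),
      x ∈ pvEnumKeys := by
  intro x hx
  obtain ⟨i, hi, rfl⟩ := List.mem_map.mp hx
  have hpos : (0 : Int) ≤ i := by
    have h := (PySem.List.mem_pyRange_iff_of_pos (show (0 : Int) < 5 by norm_num) i).mp hi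
    omega
  have hsl : PySem.List.slice M (some i) (some (i + 5))
      = (M.drop i.toNat).take ((i + 5).toNat - i.toNat) :=
    PySem.List.slice_toNat M (by omega) (by omega)
  have hlen : (PySem.List.slice M (some i) (some (i + 5))).length ≤ 5 := by
    rw [hsl]
    have := List.length_take_le ((i + 5).toNat - i.toNat) (M.drop i.toNat)
    omega
  have hcnt := pvCount_three_le (PySem.List.slice M (some i) (some (i + 5)))
  refine pvMem_enumKeys _ _ _ (by positivity) (by positivity) (by positivity) ?_
  omega

-- the Python sort of the score triples produces exactly the canonical arrangement
lemma pvSorted_eq (xs : List (Int × Int × Int)) (hmem : ∀ x ∈ xs, x ∈ pvEnumKeys) :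
    PySem.List.sorted xs pvKey false
      = pvEnumKeys.flatMap (fun k => List.replicate (xs.count k) k) := by
  have hnd : pvEnumKeys.Nodup := by decide
  have hperm : (pvEnumKeys.flatMap (fun k => List.replicate (xs.count k) k)).Perm xs := by
    rw [List.perm_iff_count]
    intro x
    rw [pvCount_flatMap_replicate (fun k => xs.count k) x pvEnumKeys hnd]
    by_cases hx : x ∈ pvEnumKeys
    · rw [if_pos hx]
    · rw [if_neg hx, Eq.comm, List.count_eq_zero]
      intro hxs; exact hx (hmem x hxs)
  have hpwE : pvEnumKeys.Pairwise (fun a b => pvKey a ≤ pvKey b) := by decide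
  have hpw := pvPairwise_flatMap_replicate (fun a => le_refl (pvKey a)) (fun k => xs.count k)
    pvEnumKeys hpwE
  rw [PySem.List.sorted_eq_sorted_of_perm xs _ pvKey pvKey_inj hperm.symm]
  exact PySem.List.sorted_eq_self_of_pairwise _ pvKey hpw

-- B's defaulted reads of the capped pick list are the capped reads of picks itself
lemma pvBounds (picks : List Int) :
    PySem.List.pyGetD ((PySem.List.slice picks none (some 3)).map (fun p => max p 0) ++ [0, 0, 0]) 0 0
        = max (PySem.List.pyGetD picks 0 0) 0
    ∧ PySem.List.pyGetD ((PySem.List.slice picks none (some 3)).map (fun p => max p 0) ++ [0, 0, 0]) 1 0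
        = max (PySem.List.pyGetD picks 1 0) 0
    ∧ PySem.List.pyGetD ((PySem.List.slice picks none (some 3)).map (fun p => max p 0) ++ [0, 0, 0]) 2 0
        = max (PySem.List.pyGetD picks 2 0) 0 := by
  have hsl : PySem.List.slice picks none (some 3) = picks.take 3 := by
    rw [PySem.List.slice_to picks (by omega)]
    rfl
  match picks with
  | [] => refine ⟨by decide, by decide, by decide⟩
  | [a] =>
    rw [hsl]
    refine ⟨?_, ?_, ?_⟩ <;>
      (rw [PySem.List.pyGetD_ofNat', PySem.List.pyGetD_ofNat']; rfl)
  | [a, b] =>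
    rw [hsl]
    refine ⟨?_, ?_, ?_⟩ <;>
      (rw [PySem.List.pyGetD_ofNat', PySem.List.pyGetD_ofNat']; rfl)
  | a :: b :: c :: r =>
    rw [hsl]
    have ht : (a :: b :: c :: r).take 3 = [a, b, c] := by simp [List.take]
    rw [ht]
    refine ⟨?_, ?_, ?_⟩ <;>
      (rw [PySem.List.pyGetD_ofNat', PySem.List.pyGetD_ofNat']; rfl)

-- ===== VERDICT (by name: the statement is the Claim_ definition above) =====
theorem solution_spec : Claim_equal_solution := by
  intro picks minerals _ _
  unfold Spec_solution solution solution_alt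
  simp only [PySem.List.foldl_append_singleton_eq_map, List.nil_append, List.map_map,
    Function.comp_def]
  rw [pvGreedy_eq]
  obtain ⟨e0, e1, e2⟩ := pvBounds picks
  rw [e0, e1, e2]
  rw [pvFreq_eq]
  rw [pvNestStep]
  rw [pvBside _ _ _ _ (by omega) (by omega)]
  rw [show (fun t : Int × Int × Int =>
      toLex ((-t.1, toLex ((-t.2.1, -t.2.2) : Int × Int)) : Int × (Int ×ₗ Int))) = pvKey from rfl]
  rw [pvSorted_eq _ (pvScore_mem _)]
  rw [zero_add]
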